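-- pv_equiv track=rewrite | github.com/P-uyoung/Algorithms | 백준/Bronze/8958. OX퀴즈/OX퀴즈.py | quiz
-- ===== SOURCE A (Python) =====
-- def quiz(s):
--     score, res = 0, 0
--     for i in s:
--         if i == 'O':
--             score += 1
--         else:
--             score = 0
--         res += score
--     return res
-- ===== SOURCE B (Python) =====
-- def quiz(s):
--     # Brute force over start positions: the answer equals the number of
--     # substrings of s consisting solely of 'O' (position i contributes the
--     # length of the maximal run of 'O' starting at i). No running state is
--     # carried between positions; each suffix is scanned afresh.
--     total = 0
--     t = s
--     while t:
--         for c in t: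
--             if c != 'O':
--                 break
--             total += 1
--         t = t[1:]
--     return total
-- ===== Notes on version B (the rewrite author's own statement) =====
-- stated objective: alternative
-- what changed: B counts all substrings consisting solely of 'O' by a nested brute-force scan (for each suffix, the length of its leading 'O' run), instead of A's single stateful pass with a running score; no counter is carried between positions.
import Mathlib
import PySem

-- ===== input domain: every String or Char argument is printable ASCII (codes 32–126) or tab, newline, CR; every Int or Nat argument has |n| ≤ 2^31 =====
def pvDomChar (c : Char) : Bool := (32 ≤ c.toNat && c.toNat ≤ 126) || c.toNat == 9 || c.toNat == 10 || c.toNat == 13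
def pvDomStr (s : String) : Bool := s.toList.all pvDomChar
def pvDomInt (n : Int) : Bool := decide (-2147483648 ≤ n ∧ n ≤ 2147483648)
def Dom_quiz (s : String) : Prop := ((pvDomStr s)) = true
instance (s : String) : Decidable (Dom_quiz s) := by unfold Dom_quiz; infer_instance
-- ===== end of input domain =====

-- B counts all-'O' substrings by a fresh nested scan per start position instead of A's running score (alternative decomposition, not faster).

-- ===== PORT A =====
-- A: for each char, score += 1 on 'O' else score = 0, and res += score every step.
def quiz (s : String) : Int :=
  (s.toList.foldl
    (fun (p : Int × Int) i =>
      let score := if i = 'O' then p.1 + 1 else 0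
      (score, p.2 + score))
    (0, 0)).2

-- ===== PORT B =====
-- inner 'for c in t: if c != 'O': break; total += 1' — scans leading 'O's, adding 1 each
def quizScan : List Char → Int → Int
  | [], total => total
  | c :: t, total => if c ≠ 'O' then total else quizScan t (total + 1)

-- outer 'while t: <inner scan>; t = t[1:]' — recursion on the suffix
def quizGo : List Char → Int → Int
  | [], total => total
  | c :: t, total => quizGo t (quizScan (c :: t) total)

def quiz_alt (s : String) : Int := quizGo s.toList 0

-- ===== PRECONDITION & SPEC =====
def Spec_quiz (s : String) (out : Int) : Prop := out = quiz_alt s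
instance (s : String) (out : Int) : Decidable (Spec_quiz s out) := by unfold Spec_quiz; infer_instance

-- ===== CLAIM (what is proved, stated in full; the proofs are below) =====
def Claim_equal_quiz : Prop := ∀ (s : String), Dom_quiz s → Spec_quiz s (quiz s)

-- ===== LEMMAS AND PROOFS =====

-- length of the leading run of 'O's, the quantity B's inner scan adds
def pvRun : List Char → Int
  | [] => 0
  | c :: t => if c = 'O' then 1 + pvRun t else 0

theorem quizScan_eq (l : List Char) (a : Int) : quizScan l a = a + pvRun l := by
  induction l generalizing a with
  | nil => simp [quizScan, pvRun]
  | cons c t ih =>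
    by_cases hc : c = 'O' <;> simp [quizScan, pvRun, hc, ih] <;> ring

theorem quizGo_shift (l : List Char) (a : Int) : quizGo l a = a + quizGo l 0 := by
  induction l generalizing a with
  | nil => simp [quizGo]
  | cons c t ih =>
    simp only [quizGo, quizScan_eq]
    rw [ih, ih (0 + pvRun (c :: t))]
    ring

-- main invariant: A's fold from state (k, a) equals B's count from a plus k per leading 'O'
theorem pvMain (l : List Char) (k a : Int) :
    (l.foldl
      (fun (p : Int × Int) i =>
        let score := if i = 'O' then p.1 + 1 else 0
        (score, p.2 + score))
      (k, a)).2 = quizGo l a + k * pvRun l := by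
  induction l generalizing k a with
  | nil => simp [quizGo, pvRun]
  | cons c t ih =>
    by_cases hc : c = 'O'
    · simp only [List.foldl_cons, hc, if_true, quizGo, quizScan_eq, pvRun]
      rw [ih, quizGo_shift t (a + (k + 1)), quizGo_shift t (a + (1 + pvRun t))]
      ring
    · simp only [List.foldl_cons, quizGo, quizScan_eq, pvRun, if_neg hc]
      rw [ih]
      ring

-- ===== VERDICT (by name: the statement is the Claim_ definition above) =====
theorem quiz_spec : Claim_equal_quiz := by
  intro s _
  show quiz s = quiz_alt s
  unfold quiz quiz_alt
  rw [pvMain]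
  ring
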